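-- pv_equiv track=rewrite | github.com/Ir1svanquish/Python-Codes | logs_manipulation.py | remove_M_longest_woods
-- ===== SOURCE A (Python) =====
-- def remove_M_longest_woods(woods, M):
--     if len(woods) < M:
--         return woods
--     else:
--         copy = sorted(woods, reverse = True)
--         longest_logs = []
--         for n in range(M):
--             longest_logs.append(copy[n])
--         result = []
--         for logs in woods:
--             if logs not in longest_logs:
--                 result.append(logs)
--                 result.sort()
--         return result
-- ===== SOURCE B (Python) =====
-- def remove_M_longest_woods(woods, M):
--     if len(woods) < M:
--         return woods
--     s = sorted(woods)
--     if M <= 0: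
--         return s
--     v = s[len(s) - M]
--     return [x for x in s if x < v]
-- ===== Notes on version B (the rewrite author's own statement) =====
-- stated objective: faster
-- what changed: Replaced A's two sorts plus a top-M membership list and a re-sort after every append with a single ascending sort, the M-th-largest value as a threshold, and one strict-below filter pass.
import Mathlib
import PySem

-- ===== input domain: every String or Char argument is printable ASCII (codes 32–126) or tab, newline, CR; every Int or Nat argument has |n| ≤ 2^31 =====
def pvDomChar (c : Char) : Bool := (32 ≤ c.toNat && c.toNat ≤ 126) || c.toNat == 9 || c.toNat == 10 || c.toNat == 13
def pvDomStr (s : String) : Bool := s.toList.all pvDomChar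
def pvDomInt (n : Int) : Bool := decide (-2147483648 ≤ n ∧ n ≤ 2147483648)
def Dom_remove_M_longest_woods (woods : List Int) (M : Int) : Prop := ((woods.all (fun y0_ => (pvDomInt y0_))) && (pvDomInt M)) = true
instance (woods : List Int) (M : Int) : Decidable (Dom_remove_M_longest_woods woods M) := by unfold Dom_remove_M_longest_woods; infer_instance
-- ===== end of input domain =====

-- B replaces A's two sorts + top-M membership list + re-sort after every append with one
-- ascending sort, the M-th-largest value as a threshold, and a single strict-below filter (faster).

-- ===== PORT A =====
def remove_M_longest_woods (woods : List Int) (M : Int) : List Int :=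
  if PySem.List.len woods < M then woods
  else
    let copy := PySem.List.sorted woods (fun x => x) true
    let longest_logs := (PySem.List.pyRange 0 M).foldl
      (fun acc n => acc ++ [PySem.List.pyGetD copy n 0]) []
      -- copy[n]: always in range here (0 ≤ n < M ≤ len(copy)), so pyGetD's default is never used
    woods.foldl
      (fun result logs =>
        if logs ∈ longest_logs then result
        else PySem.List.sorted (result ++ [logs]) (fun x => x)) []

-- ===== PORT B =====
def remove_M_longest_woods_alt (woods : List Int) (M : Int) : List Int :=
  if PySem.List.len woods < M then woods
  else
    let s := PySem.List.sorted woods (fun x => x)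
    if M ≤ 0 then s
    else
      -- s[len(s)-M]: always in range here (0 < M ≤ len(s)), so pyGetD's default is never used
      let v := PySem.List.pyGetD s (PySem.List.len s - M) 0
      s.filter (fun x => decide (x < v))

-- ===== PRECONDITION & SPEC =====
def Spec_remove_M_longest_woods (woods : List Int) (M : Int) (out : List Int) : Prop := out = remove_M_longest_woods_alt woods M
instance (woods : List Int) (M : Int) (out : List Int) : Decidable (Spec_remove_M_longest_woods woods M out) := by unfold Spec_remove_M_longest_woods; infer_instance

-- ===== CLAIM (what is proved, stated in full; the proofs are below) =====
def Claim_equal_remove_M_longest_woods : Prop := ∀ (woods : List Int) (M : Int), Dom_remove_M_longest_woods woods M → Spec_remove_M_longest_woods woods M (remove_M_longest_woods woods M)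

-- ===== LEMMAS AND PROOFS =====

-- A's inner loop (append then re-sort, skipping members of L) computes sorted(acc ++ filtered ws).
lemma foldl_sort_insert (ws : List Int) (acc L : List Int) :
    ws.foldl
      (fun result logs =>
        if logs ∈ L then result
        else PySem.List.sorted (result ++ [logs]) (fun x => x))
      (PySem.List.sorted acc (fun x => x))
    = PySem.List.sorted (acc ++ ws.filter (fun x => !L.contains x)) (fun x => x) := by
  induction ws generalizing acc with
  | nil => simp
  | cons x ws ih =>
    by_cases hx : x ∈ L
    · simpa [hx, List.filter_cons] using ih acc
    · have hperm : (PySem.List.sorted acc (fun x => x) ++ [x]).Perm (acc ++ [x]) :=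
        (PySem.List.sorted_perm acc (fun x => x) false).append_right [x]
      have hs : PySem.List.sorted (PySem.List.sorted acc (fun x => x) ++ [x]) (fun x => x)
          = PySem.List.sorted (acc ++ [x]) (fun x => x) :=
        PySem.List.sorted_eq_sorted_of_perm _ _ _ (fun a b h => h) hperm
      rw [List.foldl_cons, if_neg hx, hs, ih (acc ++ [x])]
      simp [hx]

-- A's first loop collects copy[0..M-1], i.e. the first M elements of copy.
lemma longest_eq_take (copy : List Int) (M : Nat) (hM : M ≤ copy.length) :
    (PySem.List.pyRange 0 (M : Int)).foldl
      (fun acc n => acc ++ [PySem.List.pyGetD copy n 0]) []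
    = copy.take M := by
  rw [PySem.List.foldl_append_singleton_eq_map, PySem.List.pyRange_zero_natCast]
  simp only [List.map_map, List.nil_append]
  apply List.ext_getElem
  · simp [hM]
  · intro i h1 h2
    have hi : i < M := by simpa using h1
    have hic : (i : Int) < (copy.length : Int) := by exact_mod_cast lt_of_lt_of_le hi hM
    simp [PySem.List.pyGetD_eq_getElem copy (i := (i : Int)) 0 (by positivity) hic]

-- sorting in reverse is the reverse of sorting ascending (Int values, no key).
lemma sorted_rev_eq_reverse (woods : List Int) :
    PySem.List.sorted woods (fun x => x) true
    = (PySem.List.sorted woods (fun x => x)).reverse := by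
  refine List.Perm.eq_of_pairwise (le := fun a b => b ≤ a)
    (fun a b _ _ h1 h2 => le_antisymm h2 h1) ?_ ?_ ?_
  · exact PySem.List.sorted_pairwise_rev woods (fun x => x)
  · exact List.pairwise_reverse.mpr (by simpa using PySem.List.sorted_pairwise woods (fun x => x))
  · exact (PySem.List.sorted_perm woods (fun x => x) true).trans
      ((PySem.List.sorted_perm woods (fun x => x) false).symm.trans (List.reverse_perm _).symm)

-- membership in a tail slice of the ascending sort = being ≥ the value at the cut.
lemma mem_drop_sorted_iff (woods : List Int) (k : Nat)
    (hk : k < (PySem.List.sorted woods (fun x => x)).length) (x : Int) :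
    x ∈ (PySem.List.sorted woods (fun x => x)).drop k ↔
      x ∈ woods ∧ (PySem.List.sorted woods (fun x => x))[k] ≤ x := by
  constructor
  · intro hmem
    obtain ⟨i, hi, hix⟩ := List.mem_iff_getElem.mp hmem
    rw [List.getElem_drop] at hix
    have hlt : k + i < (PySem.List.sorted woods (fun x => x)).length := by
      simp only [List.length_drop] at hi; omega
    refine ⟨?_, ?_⟩
    · rw [← PySem.List.mem_sorted woods (fun x => x) false x]
      exact hix ▸ List.getElem_mem hlt
    · exact hix ▸ PySem.List.sorted_id_getElem_mono woods (Nat.le_add_right k i) hlt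
  · rintro ⟨hmem, hle⟩
    have hx : x ∈ PySem.List.sorted woods (fun x => x) :=
      (PySem.List.mem_sorted woods (fun x => x) false x).mpr hmem
    obtain ⟨i, hi, hix⟩ := List.mem_iff_getElem.mp hx
    by_cases hik : k ≤ i
    · refine List.mem_iff_getElem.mpr ⟨i - k, by simp only [List.length_drop]; omega, ?_⟩
      simp only [List.getElem_drop, Nat.add_sub_cancel' hik]
      exact hix
    · have h1 : (PySem.List.sorted woods (fun x => x))[i] ≤ (PySem.List.sorted woods (fun x => x))[k] :=
        PySem.List.sorted_id_getElem_mono woods (by omega) hk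
      have h2 : x = (PySem.List.sorted woods (fun x => x))[k] := le_antisymm (hix ▸ h1) hle
      refine List.mem_iff_getElem.mpr ⟨0, by simp only [List.length_drop]; omega, ?_⟩
      rw [List.getElem_drop]
      simpa using h2.symm

-- filtering commutes with the ascending sort.
lemma sorted_filter_comm (woods : List Int) (p : Int → Bool) :
    PySem.List.sorted (woods.filter p) (fun x => x)
    = (PySem.List.sorted woods (fun x => x)).filter p := by
  refine PySem.List.sorted_id_eq_of_perm_of_pairwise _ _ ?_ ?_
  · exact (PySem.List.sorted_perm woods (fun x => x) false).filter p
  · exact ((PySem.List.sorted_pairwise woods (fun x => x))).filter p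

-- ===== VERDICT (by name: the statement is the Claim_ definition above) =====
theorem remove_M_longest_woods_spec : Claim_equal_remove_M_longest_woods := by
  intro woods M _
  unfold Spec_remove_M_longest_woods remove_M_longest_woods remove_M_longest_woods_alt
  have hsl : (PySem.List.sorted woods (fun x => x)).length = woods.length :=
    (PySem.List.sorted_perm woods (fun x => x) false).length_eq
  by_cases hlen : (woods.length : Int) < M
  · simp [PySem.List.len, hlen]
  · have hMn : M ≤ (woods.length : Int) := not_lt.mp hlen
    simp only [PySem.List.len, hlen, if_false, hsl]
    have hinit : (PySem.List.sorted ([] : List Int) (fun x => x)) = [] := rfl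
    by_cases hM0 : M ≤ 0
    · have hr : PySem.List.pyRange 0 M = [] := by
        simp [PySem.List.pyRange]
        omega
      rw [hr]
      simp only [List.foldl_nil, if_pos hM0]
      have := foldl_sort_insert woods [] []
      rw [hinit] at this
      simpa using this
    · rw [if_neg hM0]
      -- the index len(s) - M is in range
      have h0 : (0 : Int) ≤ (woods.length : Int) - M := by omega
      have h1 : (woods.length : Int) - M < ((PySem.List.sorted woods (fun x => x)).length : Int) := by
        rw [hsl]; omega
      rw [PySem.List.pyGetD_eq_getElem _ 0 h0 h1]
      have hkeq' : ((woods.length : Int) - M).toNat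
          = (PySem.List.sorted woods (fun x => x)).length - M.toNat := by omega
      simp only [hkeq']
      -- name the cut position
      have hMcast : M = (M.toNat : Int) := (Int.toNat_of_nonneg (by omega)).symm
      -- the top-M list is the reversed tail slice of the ascending sort
      have hlong : (PySem.List.pyRange 0 M).foldl
            (fun acc n => acc ++ [PySem.List.pyGetD (PySem.List.sorted woods (fun x => x) true) n 0]) []
          = ((PySem.List.sorted woods (fun x => x)).drop
              ((PySem.List.sorted woods (fun x => x)).length - M.toNat)).reverse := by
        conv_lhs => rw [sorted_rev_eq_reverse, hMcast]
        rw [longest_eq_take _ M.toNat (by simp [hsl]; omega), List.take_reverse]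
      rw [hlong]
      have hfs := foldl_sort_insert woods []
        (((PySem.List.sorted woods (fun x => x)).drop
            ((PySem.List.sorted woods (fun x => x)).length - M.toNat)).reverse)
      rw [hinit] at hfs
      rw [hfs]
      have hkk : (PySem.List.sorted woods (fun x => x)).length - M.toNat
          < (PySem.List.sorted woods (fun x => x)).length := by omega
      have hcong : woods.filter (fun x =>
            !(((PySem.List.sorted woods (fun x => x)).drop
                ((PySem.List.sorted woods (fun x => x)).length - M.toNat)).reverse.contains x))
          = woods.filter (fun x => decide (x <
              (PySem.List.sorted woods (fun x => x))[
                (PySem.List.sorted woods (fun x => x)).length - M.toNat]'hkk)) := by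
        apply List.filter_congr
        intro x hxw
        have : x ∈ ((PySem.List.sorted woods (fun x => x)).drop
            ((PySem.List.sorted woods (fun x => x)).length - M.toNat)).reverse ↔
            (PySem.List.sorted woods (fun x => x))[(PySem.List.sorted woods (fun x => x)).length - M.toNat] ≤ x := by
          rw [List.mem_reverse, mem_drop_sorted_iff woods _ hkk x]
          exact and_iff_right hxw
        simp only [hsl] at this
        simp [this, ← decide_not]
      rw [hcong, List.nil_append, sorted_filter_comm]
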